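-- pv_equiv track=rewrite | github.com/hunu12/MALCOM | ncd/transforms.py | vertical_curves
-- ===== SOURCE A (Python) =====
-- def vertical_curves(feature_list):
--     curves = []
--     for _, H, W in feature_list:
--         indices = []
--         for ii in range(int(H * W)):
--             y = ii % H
--             x = ii // H
--             indices.append(int(y * W + x))
--         curves.append(indices)
--     return curves
-- ===== SOURCE B (Python) =====
-- def vertical_curves(feature_list):
--     curves = []
--     for _, H, W in feature_list:
--         n = int(H * W)
--         indices = []
--         v = 0
--         for _ in range(n):
--             indices.append(v)
--             v += W
--             if v >= n:
--                 v = v - n + 1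
--         curves.append(indices)
--     return curves
-- ===== Notes on version B (the rewrite author's own statement) =====
-- stated objective: faster
-- what changed: Replaces per-index divmod index-cracking ((ii%H)*W + ii//H computed independently for each ii) by an incremental recurrence: a single accumulator starts at 0, advances by +W each step and wraps to v-n+1 when it reaches n=H*W, so each index is derived from the previous one with additions only (constant-factor win: no div/mod per element); Pre_ excludes features with both dimensions negative, where int(H*W) is positive and A's floor division/modulo by the negative H yields an accidental sequence the additive recurrence does not reproduce.
-- outside the precondition, e.g. on vertical_curves([(5, -2, -3)]): A returns [[0, 2, -1, 1, -2, 0]], B returns [[0, -3, -6, -9, -12, -15]]; on vertical_curves([(0, -1, -2)]): A returns [[0, -1]], B returns [[0, -2]]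
import Mathlib
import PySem

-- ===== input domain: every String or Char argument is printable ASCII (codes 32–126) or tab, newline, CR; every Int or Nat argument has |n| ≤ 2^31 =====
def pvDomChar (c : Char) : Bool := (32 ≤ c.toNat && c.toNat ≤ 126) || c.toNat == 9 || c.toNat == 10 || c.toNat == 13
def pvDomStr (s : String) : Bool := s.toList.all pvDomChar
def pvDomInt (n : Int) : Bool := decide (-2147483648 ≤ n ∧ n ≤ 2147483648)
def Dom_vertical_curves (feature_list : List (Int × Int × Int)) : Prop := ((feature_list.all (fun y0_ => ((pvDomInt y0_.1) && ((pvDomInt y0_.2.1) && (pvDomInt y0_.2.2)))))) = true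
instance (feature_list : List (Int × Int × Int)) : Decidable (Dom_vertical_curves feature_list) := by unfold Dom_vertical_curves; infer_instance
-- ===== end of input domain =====

-- B replaces per-index divmod index-cracking by an additive recurrence (v += W, wrap to v-n+1 at n)
-- carried across iterations (objective: faster — constant-factor, no per-element div/mod).

-- ===== PORT A =====
def vertical_curves (feature_list : List (Int × Int × Int)) : List (List Int) :=
  feature_list.foldl (fun curves feat =>
    curves ++ [ (PySem.List.pyRange 0 (feat.2.1 * feat.2.2) 1).foldl (fun indices ii =>
        indices ++ [PySem.Int.mod ii feat.2.1 * feat.2.2 + PySem.Int.floordiv ii feat.2.1]) [] ]) []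

-- ===== PORT B =====
def vertical_curves_alt (feature_list : List (Int × Int × Int)) : List (List Int) :=
  feature_list.foldl (fun curves feat =>
    let n := feat.2.1 * feat.2.2
    let st := (PySem.List.pyRange 0 n 1).foldl (fun (st : List Int × Int) _ =>
      let indices := st.1 ++ [st.2]
      let v := st.2 + feat.2.2
      (indices, if v ≥ n then v - n + 1 else v)) ([], 0)
    curves ++ [st.1]) []

-- ===== PRECONDITION & SPEC =====
-- Pre_ excludes inputs containing a feature whose H and W are both negative: there the loop bound
-- int(H*W) is positive and A cracks indices with floor division/modulo by the negative H, a degenerate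
-- corner for image dimensions whose accidental sequence B's additive recurrence does not reproduce.
def Pre_vertical_curves (feature_list : List (Int × Int × Int)) : Prop :=
  ∀ feat ∈ feature_list, ¬ (feat.2.1 < 0 ∧ feat.2.2 < 0)
instance (feature_list : List (Int × Int × Int)) : Decidable (Pre_vertical_curves feature_list) := by unfold Pre_vertical_curves; infer_instance
def pvWitness_vertical_curves : (List (Int × Int × Int)) := [(0, 2, 3), (1, 0, 5), (-2, -1, 4)]
def Spec_vertical_curves (feature_list : List (Int × Int × Int)) (out : List (List Int)) : Prop := out = vertical_curves_alt feature_list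
instance (feature_list : List (Int × Int × Int)) (out : List (List Int)) : Decidable (Spec_vertical_curves feature_list out) := by unfold Spec_vertical_curves; infer_instance

-- ===== CLAIM (what is proved, stated in full; the proofs are below) =====
def Claim_equal_vertical_curves : Prop := ∀ (feature_list : List (Int × Int × Int)), Dom_vertical_curves feature_list → Pre_vertical_curves feature_list → Spec_vertical_curves feature_list (vertical_curves feature_list)

-- ===== LEMMAS AND PROOFS =====

-- A's per-index formula.
def idxA (H W ii : Int) : Int := PySem.Int.mod ii H * W + PySem.Int.floordiv ii H

-- B's step function for a feature with dimensions H, W (n = H*W).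
def stepB (H W : Int) (st : List Int × Int) : List Int × Int :=
  let indices := st.1 ++ [st.2]
  let v := st.2 + W
  (indices, if v ≥ H * W then v - H * W + 1 else v)

lemma vertical_curves_eq_map (fl : List (Int × Int × Int)) :
    vertical_curves fl = fl.map (fun feat =>
      (PySem.List.pyRange 0 (feat.2.1 * feat.2.2) 1).map (idxA feat.2.1 feat.2.2)) := by
  unfold vertical_curves idxA
  rw [PySem.List.foldl_append_singleton_eq_map]
  simp only [List.nil_append]
  apply List.map_congr_left
  intro feat _
  rw [PySem.List.foldl_append_singleton_eq_map]
  rfl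

lemma foldl_const_iterate {α β : Type} (g : α → α) (l : List β) (init : α) :
    l.foldl (fun st _ => g st) init = g^[l.length] init := by
  induction l generalizing init with
  | nil => rfl
  | cons a t ih => simp [List.foldl_cons, ih, Function.iterate_succ_apply]

lemma vertical_curves_alt_eq_map (fl : List (Int × Int × Int)) :
    vertical_curves_alt fl = fl.map (fun feat =>
      ((stepB feat.2.1 feat.2.2)^[(feat.2.1 * feat.2.2 - 0).toNat] ([], 0)).1) := by
  unfold vertical_curves_alt
  rw [PySem.List.foldl_append_singleton_eq_map]
  simp only [List.nil_append]
  apply List.map_congr_left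
  intro feat _
  show (List.foldl (fun st (_ : Int) => stepB feat.2.1 feat.2.2 st) ([], 0)
      (PySem.List.pyRange 0 (feat.2.1 * feat.2.2) 1)).1 = _
  rw [foldl_const_iterate (stepB feat.2.1 feat.2.2), PySem.List.length_pyRange_one]

lemma idxA_zero (H W : Int) : idxA H W 0 = 0 := by
  simp [idxA, PySem.Int.mod, PySem.Int.floordiv]

-- the recurrence advances A's formula by one index (positive dimensions)
lemma step_formula (H W ii : Int) (hH : 0 < H) (hW : 0 < W) (h0 : 0 ≤ ii) (hlt : ii < H * W) :
    (if idxA H W ii + W ≥ H * W then idxA H W ii + W - H * W + 1 else idxA H W ii + W)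
      = idxA H W (ii + 1) := by
  have hq := PySem.Int.floordiv_mul_add_mod ii H
  have hr0 : 0 ≤ PySem.Int.mod ii H := PySem.Int.mod_nonneg ii hH
  have hrH : PySem.Int.mod ii H < H := PySem.Int.mod_lt ii hH
  set q := PySem.Int.floordiv ii H with hqdef
  set r := PySem.Int.mod ii H with hrdef
  have hq0 : 0 ≤ q := by nlinarith
  have hqW : q < W := by nlinarith
  by_cases hlast : r = H - 1
  · -- end of a column: wrap; ii + 1 = H * (q + 1)
    have hii : ii = q * H + (H - 1) := by omega
    have hexp : (q + 1) * H = q * H + H := by ring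
    have hexp2 : (q + 1 + 1) * H = q * H + H + H := by ring
    have hfd : PySem.Int.floordiv (ii + 1) H = q + 1 := by
      rw [PySem.Int.floordiv_eq_iff_of_pos hH]; omega
    have hmod : PySem.Int.mod (ii + 1) H = 0 := by
      have h2 := PySem.Int.floordiv_mul_add_mod (ii + 1) H
      rw [hfd] at h2; omega
    have hge : idxA H W ii + W ≥ H * W := by
      simp only [idxA, ← hqdef, ← hrdef, hlast]; nlinarith
    rw [if_pos hge]
    simp only [idxA, ← hqdef, ← hrdef, hlast, hfd, hmod]
    ring
  · -- within a column: no wrap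
    have hexp : (q + 1) * H = q * H + H := by ring
    have hfd : PySem.Int.floordiv (ii + 1) H = q := by
      rw [PySem.Int.floordiv_eq_iff_of_pos hH]; omega
    have hmod : PySem.Int.mod (ii + 1) H = r + 1 := by
      have h2 := PySem.Int.floordiv_mul_add_mod (ii + 1) H
      rw [hfd] at h2; omega
    have hlt' : idxA H W ii + W < H * W := by
      simp only [idxA, ← hqdef, ← hrdef]
      have hrle : r ≤ H - 2 := by omega
      nlinarith
    rw [if_neg (by omega)]
    simp only [idxA, ← hqdef, ← hrdef, hfd, hmod]
    ring

-- loop invariant: after m steps, indices = [idxA 0, …, idxA (m-1)] and v = idxA m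
lemma iterate_invariant (H W : Int) (hH : 0 < H) (hW : 0 < W) (m : Nat)
    (hm : (m : Int) ≤ H * W) :
    (stepB H W)^[m] ([], 0)
      = ((List.range m).map (fun k : Nat => idxA H W (k : Int)), idxA H W (m : Int)) := by
  induction m with
  | zero => simp [idxA_zero]
  | succ p ih =>
    have hp : (p : Int) ≤ H * W := by push_cast at hm ⊢; omega
    have hplt : (p : Int) < H * W := by push_cast at hm ⊢; omega
    rw [Function.iterate_succ_apply', ih hp]
    unfold stepB
    refine Prod.ext (by simp [List.range_succ]) ?_
    have := step_formula H W (p : Int) hH hW (Int.natCast_nonneg p) hplt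
    push_cast
    push_cast at this
    exact this

-- per-feature equality under Pre_
lemma inner_eq (H W : Int) (h : ¬ (H < 0 ∧ W < 0)) :
    ((stepB H W)^[(H * W - 0).toNat] ([], 0)).1
      = (PySem.List.pyRange 0 (H * W) 1).map (idxA H W) := by
  by_cases hH : 0 < H
  · by_cases hW : 0 < W
    · have hmul : 0 < H * W := mul_pos hH hW
      rw [iterate_invariant H W hH hW (H * W - 0).toNat (by omega)]
      rw [PySem.List.pyRange_one, List.map_map]
      simp [Function.comp]
    · have hn : H * W ≤ 0 := mul_nonpos_iff.mpr (Or.inl ⟨le_of_lt hH, by omega⟩)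
      rw [PySem.List.pyRange_one_eq_nil hn]
      have : (H * W - 0).toNat = 0 := by omega
      rw [this]; rfl
  · have hn : H * W ≤ 0 := by
      rcases lt_or_ge H 0 with hneg | hz
      · have hW0 : 0 ≤ W := by by_contra hc; exact h ⟨hneg, by omega⟩
        exact mul_nonpos_iff.mpr (Or.inr ⟨le_of_lt hneg, hW0⟩)
      · have : H = 0 := by omega
        simp [this]
    rw [PySem.List.pyRange_one_eq_nil hn]
    have : (H * W - 0).toNat = 0 := by omega
    rw [this]; rfl

-- ===== VERDICT (by name: the statement is the Claim_ definition above) =====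
theorem vertical_curves_spec : Claim_equal_vertical_curves := by
  intro fl _ hPre
  unfold Spec_vertical_curves
  rw [vertical_curves_eq_map, vertical_curves_alt_eq_map]
  apply List.map_congr_left
  intro feat hmem
  exact (inner_eq feat.2.1 feat.2.2 (hPre feat hmem)).symm
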